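-- pv_equiv track=rewrite | github.com/bala8887/Hacker-Rank | Breaking_The_Records.py | breakingRecords
-- ===== SOURCE A (Python) =====
-- def breakingRecords(scores):
--     min_score,max_score,min_record,max_record=0,0,0,0;
--     min_score=scores[0];
--     max_score=scores[0];
--     for i in range(len(scores)):
--         if i>0:
--             if scores[i]>max_score:
--                 max_score=scores[i];
--                 max_record+=1;
--             if scores[i]<min_score:
--                 min_score=scores[i];
--                 min_record+=1;
--     return ([max_record,min_record]);
-- ===== SOURCE B (Python) =====
-- def breakingRecords(scores):
--     # prefix tables of running max / running min, then count strict transitions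
--     highs = []
--     lows = []
--     for x in scores:
--         highs.append(x if not highs else max(highs[-1], x))
--         lows.append(x if not lows else min(lows[-1], x))
--     hi = sum(1 for a, b in zip(highs, highs[1:]) if b > a)
--     lo = sum(1 for a, b in zip(lows, lows[1:]) if b < a)
--     return [hi, lo]
-- ===== Notes on version B (the rewrite author's own statement) =====
-- stated objective: alternative
-- what changed: B builds running-max and running-min prefix tables in one pass and then counts strict adjacent transitions in each table, instead of A's single index loop that updates four counters in place; Pre_ excludes the empty list, where A raises IndexError.
import Mathlib
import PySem

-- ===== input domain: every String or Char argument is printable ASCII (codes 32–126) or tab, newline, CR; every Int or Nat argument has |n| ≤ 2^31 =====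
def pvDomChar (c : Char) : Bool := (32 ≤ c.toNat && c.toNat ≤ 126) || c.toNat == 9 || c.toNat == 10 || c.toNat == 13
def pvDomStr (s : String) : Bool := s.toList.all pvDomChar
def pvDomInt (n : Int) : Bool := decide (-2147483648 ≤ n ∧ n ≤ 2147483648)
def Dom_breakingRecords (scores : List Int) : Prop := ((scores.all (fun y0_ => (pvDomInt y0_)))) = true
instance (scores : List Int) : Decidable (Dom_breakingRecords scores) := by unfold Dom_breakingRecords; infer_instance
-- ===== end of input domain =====

-- B replaces A's single index loop with running-max/min prefix tables and counts strict
-- adjacent transitions (objective: alternative decomposition; same O(n) cost).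

-- ===== PORT A =====
-- loop body of A: checks the max record first, then the min record, on the old state
def pvStepA (st : Int × Int × Int × Int) (x : Int) : Int × Int × Int × Int :=
  let p1 := if x > st.2.1 then (x, st.2.2.2 + 1) else (st.2.1, st.2.2.2)
  let p2 := if x < st.1 then (x, st.2.2.1 + 1) else (st.1, st.2.2.1)
  (p2.1, p1.1, p2.2, p1.2)

def breakingRecords (scores : List Int) : List Int :=
  match PySem.List.pyGet? scores 0 with
  | none => []   -- the first-element access raises IndexError here; excluded by Pre_
  | some s0 =>
    let st := (PySem.List.pyRange 0 scores.length 1).foldl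
      (fun st i =>
        if i > 0 then pvStepA st (PySem.List.pyGetD scores i 0) else st)
      (s0, s0, (0:Int), (0:Int))
    [st.2.2.2, st.2.2.1]

-- ===== PORT B =====
-- highs.append(x if not highs else f(highs[-1], x)) for each x
def pvScan (f : Int → Int → Int) (scores : List Int) : List Int :=
  scores.foldl (fun acc x =>
    acc ++ [match acc.getLast? with | none => x | some l => f l x]) []

-- sum(1 for a, b in zip(l, l[1:]) if p(a, b))
def pvCount (p : Int → Int → Bool) (l : List Int) : Int :=
  ((l.zip l.tail).map (fun ab => if p ab.1 ab.2 then (1:Int) else 0)).sum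

def breakingRecords_alt (scores : List Int) : List Int :=
  [pvCount (fun a b => b > a) (pvScan max scores),
   pvCount (fun a b => b < a) (pvScan min scores)]

-- ===== PRECONDITION & SPEC =====
-- Pre_ excludes only the empty list, where A raises IndexError on its first-element access.
def Pre_breakingRecords (scores : List Int) : Prop := scores ≠ []
instance (scores : List Int) : Decidable (Pre_breakingRecords scores) := by
  unfold Pre_breakingRecords; infer_instance
def pvWitness_breakingRecords : List Int := [3, 4, 2, 4, 1]

def Spec_breakingRecords (scores : List Int) (out : List Int) : Prop := out = breakingRecords_alt scores
instance (scores : List Int) (out : List Int) : Decidable (Spec_breakingRecords scores out) := by unfold Spec_breakingRecords; infer_instance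

-- ===== CLAIM (what is proved, stated in full; the proofs are below) =====
def Claim_equal_breakingRecords : Prop := ∀ (scores : List Int), Dom_breakingRecords scores → Pre_breakingRecords scores → Spec_breakingRecords scores (breakingRecords scores)

-- ===== LEMMAS AND PROOFS =====

-- the tail of the prefix-scan table, starting from current value l
def pvTailScan (f : Int → Int → Int) (l : Int) : List Int → List Int
  | [] => []
  | x :: t => f l x :: pvTailScan f (f l x) t

theorem pvScan_go (f : Int → Int → Int) :
    ∀ (t acc : List Int) (l : Int),
      t.foldl (fun acc x =>
        acc ++ [match acc.getLast? with | none => x | some l => f l x]) (acc ++ [l])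
      = (acc ++ [l]) ++ pvTailScan f l t := by
  intro t
  induction t with
  | nil => intro acc l; simp [pvTailScan]
  | cons x t ih =>
    intro acc l
    simp only [List.foldl_cons, List.getLast?_append, List.getLast?_singleton,
      Option.some_or, pvTailScan]
    have := ih (acc ++ [l]) (f l x)
    simpa [List.append_assoc] using this

theorem pvScan_cons (f : Int → Int → Int) (h : Int) (t : List Int) :
    pvScan f (h :: t) = h :: pvTailScan f h t := by
  have := pvScan_go f t [] h
  simpa [pvScan] using this

theorem pvCount_cons2 (p : Int → Int → Bool) (a b : Int) (t : List Int) :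
    pvCount p (a :: b :: t) = (if p a b then 1 else 0) + pvCount p (b :: t) := by
  simp [pvCount]

-- the max-record component of A's fold equals maxr plus B's transition count of the max table
theorem pvMaxSide : ∀ (t : List Int) (mn mx minr maxr : Int),
    (t.foldl pvStepA (mn, mx, minr, maxr)).2.2.2
      = maxr + pvCount (fun a b => b > a) (mx :: pvTailScan max mx t) := by
  intro t
  induction t with
  | nil => intro mn mx minr maxr; simp [pvCount, pvTailScan]
  | cons x t ih =>
    intro mn mx minr maxr
    have hmax : max mx x > mx ↔ x > mx := by omega
    rw [List.foldl_cons, pvTailScan, pvCount_cons2]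
    have hstep : pvStepA (mn, mx, minr, maxr) x
        = (min mn x, max mx x, minr + (if x < mn then 1 else 0),
           maxr + (if x > mx then 1 else 0)) := by
      simp only [pvStepA]
      split_ifs with h1 h2 h2 <;> simp_all <;> omega
    rw [hstep, ih]
    by_cases h : x > mx <;> simp [h, hmax] <;> try omega

-- the min-record component of A's fold equals minr plus B's transition count of the min table
theorem pvMinSide : ∀ (t : List Int) (mn mx minr maxr : Int),
    (t.foldl pvStepA (mn, mx, minr, maxr)).2.2.1
      = minr + pvCount (fun a b => b < a) (mn :: pvTailScan min mn t) := by
  intro t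
  induction t with
  | nil => intro mn mx minr maxr; simp [pvCount, pvTailScan]
  | cons x t ih =>
    intro mn mx minr maxr
    have hmin : min mn x < mn ↔ x < mn := by omega
    rw [List.foldl_cons, pvTailScan, pvCount_cons2]
    have hstep : pvStepA (mn, mx, minr, maxr) x
        = (min mn x, max mx x, minr + (if x < mn then 1 else 0),
           maxr + (if x > mx then 1 else 0)) := by
      simp only [pvStepA]
      split_ifs with h1 h2 h2 <;> simp_all <;> omega
    rw [hstep, ih]
    by_cases h : x < mn <;> simp [h, hmin] <;> try omega

-- A's range-over-indices loop, on h :: t, is the fold of pvStepA over t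
theorem pvAFold (h : Int) (t : List Int) (init : Int × Int × Int × Int) :
    (PySem.List.pyRange 0 ((t.length : Int) + 1) 1).foldl
      (fun st i => if i > 0 then pvStepA st (PySem.List.pyGetD (h :: t) i 0) else st) init
    = t.foldl pvStepA init := by
  have h0 : (0:Int) < (t.length : Int) + 1 := by positivity
  rw [PySem.List.pyRange_one_cons h0]
  simp only [List.foldl_cons, gt_iff_lt, lt_self_iff_false, if_false, zero_add]
  have hcongr : (PySem.List.pyRange 1 ((t.length : Int) + 1) 1).foldl
      (fun st i => if i > 0 then pvStepA st (PySem.List.pyGetD (h :: t) i 0) else st) init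
      = (PySem.List.pyRange 1 ((t.length : Int) + 1) 1).foldl
      (fun st i => pvStepA st (PySem.List.pyGetD (h :: t) i 0)) init := by
    apply PySem.List.foldl_congr_mem
    intro st i hi
    have h1 : (1:Int) ≤ i := (PySem.List.mem_pyRange_one.mp hi).1
    have h2 : i > 0 := by omega
    simp [h2]
  rw [hcongr]
  have hlen : ((t.length : Int) + 1) = (((h :: t).length : Int)) := by simp
  rw [hlen]
  have := PySem.List.foldl_pyRange_pyGetD' (h :: t) (0:Int) pvStepA init (a := 1) (by norm_num)
  simpa using this

-- ===== VERDICT (by name: the statement is the Claim_ definition above) =====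
theorem breakingRecords_spec : Claim_equal_breakingRecords := by
  intro scores _ hpre
  unfold Spec_breakingRecords
  obtain ⟨h, t, rfl⟩ : ∃ h t, scores = h :: t := by
    cases scores with
    | nil => exact absurd rfl hpre
    | cons a b => exact ⟨a, b, rfl⟩
  have hg : PySem.List.pyGet? (h :: t) 0 = some h := by
    simp [PySem.List.pyGet?, PySem.List.pyIdx?]
  unfold breakingRecords breakingRecords_alt
  rw [hg]
  simp only [List.length_cons, Nat.cast_add, Nat.cast_one]
  rw [pvAFold h t (h, h, 0, 0), pvScan_cons, pvScan_cons,
    pvMaxSide t h h 0 0, pvMinSide t h h 0 0]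
  norm_num
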